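-- pv_equiv track=rewrite | github.com/tareksakakini/adr-detection | multi-tasking/decode_pos.py | collect_vocab
-- ===== SOURCE A (Python) =====
-- def collect_vocab(sents):
--         vocab = {}
--         i = 0
--         for sent in sents:
--                 for word in sent:
--                         if word not in vocab:
--                                 vocab[word] = i
--                                 i+=1
--         return vocab
-- ===== SOURCE B (Python) =====
-- def collect_vocab(sents):
--     flat = [w for sent in sents for w in sent]
--     first = {}
--     for i in range(len(flat) - 1, -1, -1):
--         first[flat[i]] = i
--     return {w: r for r, w in enumerate(sorted(first, key=first.get))}
-- ===== Notes on version B (the rewrite author's own statement) =====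
-- stated objective: alternative
-- what changed: Instead of A's single pass interleaving a membership test with a counter, B sweeps the flattened word indices in reverse to record each word's first-occurrence position in a dict, then sorts the distinct words by that position and numbers them.
import Mathlib
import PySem

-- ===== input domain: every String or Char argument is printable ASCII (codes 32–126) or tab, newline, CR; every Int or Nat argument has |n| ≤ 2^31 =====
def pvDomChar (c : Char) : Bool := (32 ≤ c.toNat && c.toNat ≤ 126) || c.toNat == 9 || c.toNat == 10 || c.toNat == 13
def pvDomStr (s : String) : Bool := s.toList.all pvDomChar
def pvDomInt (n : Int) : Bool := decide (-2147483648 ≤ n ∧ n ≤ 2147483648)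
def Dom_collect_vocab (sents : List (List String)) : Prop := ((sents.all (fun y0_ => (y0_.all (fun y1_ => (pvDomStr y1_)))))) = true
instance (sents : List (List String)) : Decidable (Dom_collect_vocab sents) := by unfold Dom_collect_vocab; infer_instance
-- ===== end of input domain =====

-- B replaces A's interleaved membership-test-and-counter pass by a different scheme:
-- a reversed index sweep records each word's first-occurrence position in a dict,
-- then the words are sorted by that position and numbered. Objective: alternative.

-- ===== PORT A =====
def collect_vocab (sents : List (List String)) : List (String × Int) :=
  (sents.foldl
    (fun st sent =>
      sent.foldl
        (fun st word =>
          if st.1.contains word then st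
          else (st.1.insert word st.2, st.2 + 1))
        st)
    ((PySem.Dict.empty : PySem.Dict String Int), (0 : Int))).1.items

-- ===== PORT B =====
-- flat[i] is ported with pyGetD (i always in range here); first.get w always hits a key,
-- so the '.getD 0' branch is never taken; the final dict comprehension has distinct keys,
-- so its items are the (word, rank) pairs in order.
def collect_vocab_alt (sents : List (List String)) : List (String × Int) :=
  let flat := sents.flatMap (fun sent => sent)
  let first := (PySem.List.pyRange ((flat.length : Int) - 1) (-1) (-1)).foldl
      (fun d i => d.insert (PySem.List.pyGetD flat i "") i)
      (PySem.Dict.empty : PySem.Dict String Int)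
  let words := PySem.List.sorted first.keys (fun w => (first.get? w).getD 0) false
  (PySem.List.enumerate words 0).map (fun p => (p.2, p.1))

-- ===== PRECONDITION & SPEC =====
def Spec_collect_vocab (sents : List (List String)) (out : List (String × Int)) : Prop := out = collect_vocab_alt sents
instance (sents : List (List String)) (out : List (String × Int)) : Decidable (Spec_collect_vocab sents out) := by unfold Spec_collect_vocab; infer_instance

-- ===== CLAIM (what is proved, stated in full; the proofs are below) =====
def Claim_equal_collect_vocab : Prop := ∀ (sents : List (List String)), Dom_collect_vocab sents → Spec_collect_vocab sents (collect_vocab sents)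

-- ===== LEMMAS AND PROOFS =====

-- the loop state of A after the distinct words seen so far are S (in first-occurrence order)
def pvState (S : List String) : PySem.Dict String Int × Int :=
  (PySem.Dict.mk ((PySem.List.enumerate S 0).map (fun p => (p.2, p.1))), (S.length : Int))

lemma pvEnum_any (S : List String) (w : String) : ∀ s : Int,
    (((PySem.List.enumerate S s).map (fun p => ((p.2, p.1) : String × Int))).any
      (fun p => p.1 == w)) = S.contains w := by
  induction S with
  | nil => intro s; simp [PySem.List.enumerate_nil]
  | cons x xs ih =>
    intro s
    simp only [PySem.List.enumerate_cons, List.map_cons, List.any_cons, ih,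
      List.contains_cons]
    rw [Bool.beq_comm]

lemma pvState_contains (S : List String) (w : String) :
    (pvState S).1.contains w = S.contains w := by
  simp only [pvState, PySem.Dict.contains]
  exact pvEnum_any S w 0

lemma pvState_step (S : List String) (w : String) :
    (if (pvState S).1.contains w then pvState S
     else ((pvState S).1.insert w (pvState S).2, (pvState S).2 + 1))
    = pvState (PySem.Set.add S w) := by
  rw [pvState_contains]
  by_cases h : w ∈ S
  · simp [h, PySem.Set.add, PySem.Set.contains]
  · have hc : S.contains w = false := by simpa using h
    have hadd : PySem.Set.add S w = S ++ [w] := by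
      simp [PySem.Set.add, PySem.Set.contains, h]
    simp only [hc, Bool.false_eq_true, if_false, hadd]
    refine Prod.ext ?_ ?_
    · rw [PySem.Dict.insert]
      simp only [pvState_contains, hc, Bool.false_eq_true, if_false]
      simp [pvState, PySem.List.enumerate_append, PySem.List.enumerate_cons,
        PySem.List.enumerate_nil]
    · simp [pvState]

lemma pvState_foldl (ws : List String) (S : List String) :
    ws.foldl
      (fun st word =>
        if st.1.contains word then st
        else (st.1.insert word st.2, st.2 + 1)) (pvState S)
    = pvState (ws.foldl PySem.Set.add S) := by
  induction ws generalizing S with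
  | nil => rfl
  | cons w ws ih => simp only [List.foldl_cons, pvState_step, ih]

-- the dedup of any list is strictly increasing in first-occurrence position
lemma pvDedup_pairwise (p : List String) :
    (PySem.List.dedup p).Pairwise
      (fun a b => (PySem.List.index? p a).getD 0 < (PySem.List.index? p b).getD 0) := by
  induction p using List.reverseRecOn with
  | nil => simp [PySem.List.dedup]
  | append_singleton p x ih =>
    have hfold : PySem.List.dedup (p ++ [x]) = PySem.Set.add (PySem.List.dedup p) x := by
      simp only [PySem.List.dedup_eq_ofList, PySem.Set.ofList, List.foldl_append,
        List.foldl_cons, List.foldl_nil]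
    have hidx : ∀ a ∈ PySem.List.dedup p,
        PySem.List.index? (p ++ [x]) a = PySem.List.index? p a := by
      intro a ha
      exact PySem.List.index?_append_of_mem [x] ((PySem.List.mem_dedup p a).1 ha)
    by_cases hx : x ∈ PySem.List.dedup p
    · have : PySem.Set.add (PySem.List.dedup p) x = PySem.List.dedup p := by
        simp [PySem.Set.add, PySem.Set.contains, (PySem.List.mem_dedup p x).1 hx]
      rw [hfold, this]
      refine ih.imp_of_mem ?_
      intro a b ha hb hab
      rw [hidx a ha, hidx b hb]; exact hab
    · have hxp : x ∉ p := fun h => hx ((PySem.List.mem_dedup p x).2 h)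
      have : PySem.Set.add (PySem.List.dedup p) x = PySem.List.dedup p ++ [x] := by
        simp [PySem.Set.add, PySem.Set.contains, hxp]
      rw [hfold, this]
      rw [List.pairwise_append]
      refine ⟨ih.imp_of_mem ?_, by simp, ?_⟩
      · intro a b ha hb hab
        rw [hidx a ha, hidx b hb]; exact hab
      · intro a ha b hb
        have hb' : b = x := by simpa using hb
        subst hb'
        rw [hidx a ha, PySem.List.index?_append_singleton_self _ _ hxp]
        have hma : a ∈ p := (PySem.List.mem_dedup p a).1 ha
        obtain ⟨k, hk⟩ := Option.isSome_iff_exists.1 ((PySem.List.index?_isSome_iff p a).2 hma)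
        obtain ⟨hklt, -, -⟩ := PySem.List.getElem_of_index?_eq_some hk
        rw [hk]; simpa using hklt

-- B's reversed index sweep, rewritten as a fold over the reversed enumeration
def pvFold (l : List (Int × String)) (d : PySem.Dict String Int) : PySem.Dict String Int :=
  l.foldl (fun dd p => dd.insert p.2 p.1) d

lemma pvRange_fold_eq (flat : List String) : ∀ d : PySem.Dict String Int,
    (PySem.List.pyRange ((flat.length : Int) - 1) (-1) (-1)).foldl
      (fun dd i => dd.insert (PySem.List.pyGetD flat i "") i) d
    = pvFold (PySem.List.enumerate flat 0).reverse d := by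
  induction flat using List.reverseRecOn with
  | nil =>
    intro d
    rw [PySem.List.pyRange_neg_one_eq_nil (by simp)]
    simp [pvFold, PySem.List.enumerate_nil]
  | append_singleton p x ih =>
    intro d
    have hn : ((p ++ [x]).length : Int) - 1 = (p.length : Int) := by
      simp [List.length_append]
    have hcons : PySem.List.pyRange ((p.length : Int)) (-1) (-1)
        = (p.length : Int) :: PySem.List.pyRange ((p.length : Int) - 1) (-1) (-1) :=
      PySem.List.pyRange_neg_one_cons (by omega)
    have hget : PySem.List.pyGetD (p ++ [x]) ((p.length : Int)) "" = x := by
      rw [PySem.List.pyGetD_natCast]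
      simp [List.getD]
    have henum : (PySem.List.enumerate (p ++ [x]) 0).reverse
        = ((p.length : Int), x) :: (PySem.List.enumerate p 0).reverse := by
      rw [PySem.List.enumerate_append]
      simp [PySem.List.enumerate_cons, PySem.List.enumerate_nil]
    rw [hn, hcons, henum]
    simp only [List.foldl_cons, pvFold, hget]
    rw [show (List.foldl (fun dd i => dd.insert (PySem.List.pyGetD (p ++ [x]) i "") i)
          (d.insert x ((p.length : Int)))
          (PySem.List.pyRange ((p.length : Int) - 1) (-1) (-1)))
        = (List.foldl (fun dd i => dd.insert (PySem.List.pyGetD p i "") i)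
          (d.insert x ((p.length : Int)))
          (PySem.List.pyRange ((p.length : Int) - 1) (-1) (-1))) from
      PySem.List.foldl_congr_mem _ _ _ _ (by
        intro acc i hi
        obtain ⟨h1, h2⟩ := PySem.List.mem_pyRange_neg_one.1 hi
        obtain ⟨k, rfl⟩ : ∃ k : Nat, i = (k : Int) :=
          ⟨i.toNat, (Int.toNat_of_nonneg (by omega)).symm⟩
        have hk : k < p.length := by omega
        rw [PySem.List.pyGetD_natCast, PySem.List.pyGetD_natCast,
          List.getD_append _ _ _ _ hk])]
    exact ih (d.insert x ((p.length : Int)))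

-- keys of an insert: unchanged if present, appended if fresh
lemma pvKeys_insert (d : PySem.Dict String Int) (k : String) (v : Int) :
    (d.insert k v).keys = if d.contains k then d.keys else d.keys ++ [k] := by
  by_cases h : d.contains k
  · simp only [h, if_true]
    simp only [PySem.Dict.insert, h, if_true, PySem.Dict.keys, List.map_map]
    apply List.map_congr_left
    intro p _
    by_cases hp : p.1 = k
    · simp [hp]
    · simp [hp]
  · simp [PySem.Dict.insert, h, PySem.Dict.keys]

lemma pvContains_iff (d : PySem.Dict String Int) (k : String) :
    d.contains k = true ↔ k ∈ d.keys := by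
  simp only [PySem.Dict.contains, PySem.Dict.keys, List.any_eq_true, List.mem_map,
    beq_iff_eq]

-- the dict after the reversed sweep: each word maps to its first-occurrence index
lemma pvFold_get? (xs : List String) : ∀ (s : Int) (w : String), w ∈ xs →
    (pvFold (PySem.List.enumerate xs s).reverse PySem.Dict.empty).get? w
    = Option.map (fun k : Nat => s + (k : Int)) (PySem.List.index? xs w) := by
  induction xs with
  | nil => intro s w hw; cases hw
  | cons x xs ih =>
    intro s w hw
    have hsplit : (PySem.List.enumerate (x :: xs) s).reverse
        = (PySem.List.enumerate xs (s + 1)).reverse ++ [(s, x)] := by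
      simp [PySem.List.enumerate_cons]
    rw [hsplit]
    simp only [pvFold, List.foldl_append, List.foldl_cons, List.foldl_nil]
    by_cases hwx : w = x
    · subst hwx
      rw [PySem.Dict.get?_insert_self]
      rw [PySem.List.index?_cons_self]
      simp
    · rw [PySem.Dict.get?_insert_of_ne _ _ hwx]
      have hw' : w ∈ xs := by
        rcases List.mem_cons.1 hw with h | h
        · exact absurd h hwx
        · exact h
      rw [show (List.foldl (fun dd p => dd.insert p.2 p.1) PySem.Dict.empty
            (PySem.List.enumerate xs (s + 1)).reverse)
          = pvFold (PySem.List.enumerate xs (s + 1)).reverse PySem.Dict.empty from rfl]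
      rw [ih (s + 1) w hw']
      rw [PySem.List.index?_cons_of_ne xs (Ne.symm hwx)]
      obtain ⟨k, hk⟩ := Option.isSome_iff_exists.1 ((PySem.List.index?_isSome_iff xs w).2 hw')
      rw [hk]
      simp only [Option.map_some]
      congr 1
      push_cast
      ring

-- the keys of the swept dict are distinct and are exactly the words
lemma pvFold_keys (xs : List String) : ∀ s : Int,
    (pvFold (PySem.List.enumerate xs s).reverse PySem.Dict.empty).keys.Nodup
    ∧ ∀ w, w ∈ (pvFold (PySem.List.enumerate xs s).reverse PySem.Dict.empty).keys ↔ w ∈ xs := by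
  induction xs with
  | nil =>
    intro s
    constructor
    · simp [pvFold, PySem.List.enumerate_nil, PySem.Dict.keys, PySem.Dict.empty]
    · intro w; simp [pvFold, PySem.List.enumerate_nil, PySem.Dict.keys, PySem.Dict.empty]
  | cons x xs ih =>
    intro s
    have hsplit : (PySem.List.enumerate (x :: xs) s).reverse
        = (PySem.List.enumerate xs (s + 1)).reverse ++ [(s, x)] := by
      simp [PySem.List.enumerate_cons]
    obtain ⟨hnd, hmem⟩ := ih (s + 1)
    have hstep : pvFold (PySem.List.enumerate (x :: xs) s).reverse PySem.Dict.empty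
        = (pvFold (PySem.List.enumerate xs (s + 1)).reverse PySem.Dict.empty).insert x s := by
      rw [hsplit]; simp [pvFold, List.foldl_append]
    rw [hstep, pvKeys_insert]
    by_cases hc : (pvFold (PySem.List.enumerate xs (s + 1)).reverse PySem.Dict.empty).contains x
    · have hx : x ∈ xs := (hmem x).1 ((pvContains_iff _ x).1 hc)
      simp only [hc, if_true]
      refine ⟨hnd, fun w => ?_⟩
      rw [hmem w, List.mem_cons]
      constructor
      · exact Or.inr
      · rintro (rfl | h)
        · exact hx
        · exact h
    · have hx : x ∉ (pvFold (PySem.List.enumerate xs (s + 1)).reverse PySem.Dict.empty).keys :=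
        fun h => hc ((pvContains_iff _ x).2 h)
      simp only [hc, Bool.false_eq_true, if_false]
      constructor
      · simp only [List.nodup_append, List.nodup_singleton, true_and]
        refine ⟨hnd, ?_⟩
        intro a ha b hb
        simp only [List.mem_singleton] at hb
        subst hb
        exact fun h => hx (h ▸ ha)
      · intro w
        simp only [List.mem_append, hmem w, List.mem_cons]
        tauto

-- B's sort returns the distinct words in first-occurrence order
lemma pvSorted_eq_dedup (flat : List String) :
    PySem.List.sorted
      (pvFold (PySem.List.enumerate flat 0).reverse PySem.Dict.empty).keys
      (fun w => ((pvFold (PySem.List.enumerate flat 0).reverse PySem.Dict.empty).get? w).getD 0)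
      false
    = PySem.List.dedup flat := by
  obtain ⟨hnd, hmem⟩ := pvFold_keys flat 0
  have hkey : ∀ a ∈ PySem.List.dedup flat,
      ((pvFold (PySem.List.enumerate flat 0).reverse PySem.Dict.empty).get? a).getD 0
      = (((PySem.List.index? flat a).getD 0 : Nat) : Int) := by
    intro a ha
    have hma : a ∈ flat := (PySem.List.mem_dedup flat a).1 ha
    rw [pvFold_get? flat 0 a hma]
    obtain ⟨k, hk⟩ := Option.isSome_iff_exists.1 ((PySem.List.index?_isSome_iff flat a).2 hma)
    rw [hk]
    simp
  refine PySem.List.sorted_eq_of_perm_of_pairwise_lt _ _ _ ?_ ?_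
  · rw [List.perm_ext_iff_of_nodup (PySem.List.nodup_dedup flat) hnd]
    intro a
    rw [hmem a, PySem.List.mem_dedup flat a]
  · refine (pvDedup_pairwise flat).imp_of_mem ?_
    intro a b ha hb hab
    rw [hkey a ha, hkey b hb]
    exact_mod_cast hab

-- ===== VERDICT (by name: the statement is the Claim_ definition above) =====
theorem collect_vocab_spec : Claim_equal_collect_vocab := by
  intro sents _
  unfold Spec_collect_vocab collect_vocab collect_vocab_alt
  have hflat : sents.flatMap (fun sent => sent) = sents.flatten := by
    simp [List.flatMap_id']
  have h0 : ((PySem.Dict.empty : PySem.Dict String Int), (0 : Int)) = pvState [] := by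
    simp [pvState, PySem.Dict.empty, PySem.List.enumerate]
  rw [h0, ← List.foldl_flatten, pvState_foldl]
  have hded : sents.flatten.foldl PySem.Set.add [] = PySem.List.dedup sents.flatten := by
    simp [PySem.List.dedup_eq_ofList, PySem.Set.ofList_eq_foldl]
  rw [hded]
  simp only [hflat, pvRange_fold_eq]
  rw [pvSorted_eq_dedup]
  rfl
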